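-- pv_equiv track=rewrite | github.com/rhendrix/Markdown-Converter | mdcConverter.py | tabCount
-- ===== SOURCE A (Python) =====
-- def tabCount(line):
-- 	count = 0
-- 	for c in line:
-- 		if c == "\t":
-- 			count = count + 1
-- 		else:
-- 			break
-- 	return count
-- ===== SOURCE B (Python) =====
-- def tabCount(line):
-- 	return len(line) - len(line.lstrip("\t"))
-- ===== Notes on version B (the rewrite author's own statement) =====
-- stated objective: idiomatic
-- what changed: Replaces the explicit char-scan loop with a closed-form length difference using str.lstrip restricted to the tab character.
import Mathlib
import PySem

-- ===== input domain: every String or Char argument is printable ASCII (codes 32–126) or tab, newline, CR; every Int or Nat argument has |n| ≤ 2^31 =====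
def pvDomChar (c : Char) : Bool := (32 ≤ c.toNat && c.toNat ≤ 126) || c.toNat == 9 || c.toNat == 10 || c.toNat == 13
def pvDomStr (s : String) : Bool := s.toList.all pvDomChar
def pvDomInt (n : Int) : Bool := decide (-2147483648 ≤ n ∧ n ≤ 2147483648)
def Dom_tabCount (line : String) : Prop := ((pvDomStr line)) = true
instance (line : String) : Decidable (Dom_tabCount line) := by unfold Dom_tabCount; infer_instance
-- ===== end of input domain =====

-- B replaces A's explicit character-scan loop with a closed-form length difference via str.lstrip restricted to the tab character (idiomatic; same cost).
-- ===== PORT A =====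
-- loop with break: recursion over the characters, accumulator `count`
def tabCountLoop : List Char → Int → Int
  | [], count => count
  | c :: rest, count => if c == '\t' then tabCountLoop rest (count + 1) else count

def tabCount (line : String) : Int := tabCountLoop line.toList 0

-- ===== PORT B =====
-- line.lstrip("\t") ported by hand as dropWhile (· == '\t'): exact, since lstrip with
-- the single-char argument "\t" removes exactly the leading tab characters
def tabCount_alt (line : String) : Int :=
  (line.toList.length : Int) - ((line.toList.dropWhile (· == '\t')).length : Int)

-- ===== PRECONDITION & SPEC =====
def Spec_tabCount (line : String) (out : Int) : Prop := out = tabCount_alt line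
instance (line : String) (out : Int) : Decidable (Spec_tabCount line out) := by unfold Spec_tabCount; infer_instance

-- ===== CLAIM (what is proved, stated in full; the proofs are below) =====
def Claim_equal_tabCount : Prop := ∀ (line : String), Dom_tabCount line → Spec_tabCount line (tabCount line)

-- ===== LEMMAS AND PROOFS =====

-- ===== VERDICT (by name: the statement is the Claim_ definition above) =====
theorem tabCountLoop_eq (cs : List Char) (count : Int) :
    tabCountLoop cs count = count + ((cs.takeWhile (· == '\t')).length : Int) := by
  induction cs generalizing count with
  | nil => simp [tabCountLoop]
  | cons c rest ih =>
    by_cases h : c == '\t' <;> simp [tabCountLoop, List.takeWhile, h, ih] <;> try ring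

theorem tabCount_spec : Claim_equal_tabCount := by
  intro line _
  show tabCount line = tabCount_alt line
  have hlen : (line.toList.takeWhile (· == '\t')).length
      + (line.toList.dropWhile (· == '\t')).length = line.toList.length := by
    rw [← List.length_append, List.takeWhile_append_dropWhile]
  simp only [tabCount, tabCount_alt, tabCountLoop_eq]
  omega
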